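-- pv_equiv track=rewrite | github.com/merlijntishauser/unifi-homelab-ops | backend/app/services/simulator.py | _port_matches
-- ===== SOURCE A (Python) =====
-- def _port_matches(rule_port_ranges: list[str], packet_port: int | None) -> bool:
--     """Check if a packet's port matches any of the rule's port ranges."""
--     if not rule_port_ranges:
--         # No port restriction means match all ports
--         return True
--     if packet_port is None:
--         # Rule has port restrictions but packet has no port -- no match
--         return False
--
--     for port_range in rule_port_ranges:
--         if "-" in port_range:
--             parts = port_range.split("-", 1)
--             try:
--                 low, high = int(parts[0]), int(parts[1])
--             except ValueError:
--                 continue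
--             if low <= packet_port <= high:
--                 return True
--         else:
--             try:
--                 if packet_port == int(port_range):
--                     return True
--             except ValueError:
--                 continue
--
--     return False
-- ===== SOURCE B (Python) =====
-- def _port_matches(rule_port_ranges: list[str], packet_port: int | None) -> bool:
--     """Check if a packet's port matches any of the rule's port ranges.
--
--     Strategy: parse every entry into an inclusive interval, sort the
--     intervals by low endpoint, merge overlapping ones into a canonical
--     disjoint union, then test membership in the merged intervals.
--     """
--     if not rule_port_ranges:
--         return True
--     if packet_port is None:
--         return False
--
--     intervals = []
--     for s in rule_port_ranges:
--         if "-" in s: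
--             a, b = s.split("-", 1)
--             try:
--                 intervals.append((int(a), int(b)))
--             except ValueError:
--                 pass
--         else:
--             try:
--                 n = int(s)
--                 intervals.append((n, n))
--             except ValueError:
--                 pass
--
--     intervals.sort(key=lambda iv: iv[0])
--
--     merged = []
--     for lo, hi in intervals:
--         if merged and lo <= merged[-1][1]:
--             plo, phi = merged[-1]
--             merged[-1] = (plo, max(phi, hi))
--         else:
--             merged.append((lo, hi))
--
--     return any(lo <= packet_port <= hi for lo, hi in merged)
-- ===== Notes on version B (the rewrite author's own statement) =====
-- stated objective: alternative
-- what changed: B replaces A's single interleaved parse-and-test scan with a sort-and-merge algorithm: it parses all entries into inclusive intervals, sorts them by low endpoint, merges overlapping intervals into a canonical disjoint union, and then tests membership of the packet port in the merged intervals.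
import Mathlib
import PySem

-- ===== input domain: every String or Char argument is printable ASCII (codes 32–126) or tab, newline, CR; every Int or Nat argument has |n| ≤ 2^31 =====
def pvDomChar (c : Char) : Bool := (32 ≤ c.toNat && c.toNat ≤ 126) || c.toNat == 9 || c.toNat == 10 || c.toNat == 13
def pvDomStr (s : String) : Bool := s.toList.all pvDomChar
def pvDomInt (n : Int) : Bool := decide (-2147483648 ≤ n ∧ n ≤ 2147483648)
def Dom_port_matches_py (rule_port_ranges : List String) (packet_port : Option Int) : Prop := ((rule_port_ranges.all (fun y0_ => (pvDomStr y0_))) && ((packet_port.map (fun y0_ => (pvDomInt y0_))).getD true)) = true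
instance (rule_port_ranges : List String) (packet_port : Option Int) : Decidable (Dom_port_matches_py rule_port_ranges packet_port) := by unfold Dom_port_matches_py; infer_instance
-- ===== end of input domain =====

-- B uses a different algorithm: parse all entries into intervals, sort by low endpoint,
-- merge overlapping intervals into a canonical disjoint union, then test membership.

-- ===== PORT A =====
-- the for-loop of A, one rule entry at a time, early return on a match
def portMatchesLoop (packet_port : Int) : List String → Bool
  | [] => false
  | port_range :: rest =>
    if PySem.Str.isIn "-" port_range then
      match PySem.Str.splitMax? port_range "-" 1 with
      | some (p0 :: p1 :: _) =>
        match PySem.Int.ofStr? p0, PySem.Int.ofStr? p1 with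
        | some low, some high =>
          if low ≤ packet_port ∧ packet_port ≤ high then true
          else portMatchesLoop packet_port rest
        | _, _ => portMatchesLoop packet_port rest
      | _ => portMatchesLoop packet_port rest
    else
      match PySem.Int.ofStr? port_range with
      | some v => if packet_port = v then true else portMatchesLoop packet_port rest
      | none => portMatchesLoop packet_port rest

def port_matches_py (rule_port_ranges : List String) (packet_port : Option Int) : Bool :=
  if rule_port_ranges = [] then true
  else
    match packet_port with
    | none => false
    | some p => portMatchesLoop p rule_port_ranges

-- ===== PORT B =====
-- parsing loop of B (collect intervals, skip unparsable entries)
def parseRange? (s : String) : Option (Int × Int) :=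
  if PySem.Str.isIn "-" s then
    match PySem.Str.splitMax? s "-" 1 with
    | some (a :: b :: _) =>
      match PySem.Int.ofStr? a, PySem.Int.ofStr? b with
      | some lo, some hi => some (lo, hi)
      | _, _ => none
    | _ => none
  else
    (PySem.Int.ofStr? s).map (fun n => (n, n))

-- one step of B's merge loop; the accumulator holds the merged list back-to-front,
-- so Python's merged[-1] is the head (the final .reverse restores Python's order)
def mergeStep (acc : List (Int × Int)) (iv : Int × Int) : List (Int × Int) :=
  match acc with
  | (plo, phi) :: t => if iv.1 ≤ phi then (plo, max phi iv.2) :: t else iv :: (plo, phi) :: t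
  | [] => [iv]

def port_matches_py_alt (rule_port_ranges : List String) (packet_port : Option Int) : Bool :=
  if rule_port_ranges.isEmpty then true
  else
    match packet_port with
    | none => false
    | some p =>
      let intervals := rule_port_ranges.filterMap parseRange?
      let sortedIvs := PySem.List.sorted intervals (fun iv => iv.1) false
      let merged := (sortedIvs.foldl mergeStep []).reverse
      merged.any (fun iv => decide (iv.1 ≤ p) && decide (p ≤ iv.2))

-- ===== PRECONDITION & SPEC =====
def Spec_port_matches_py (rule_port_ranges : List String) (packet_port : Option Int) (out : Bool) : Prop := out = port_matches_py_alt rule_port_ranges packet_port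
instance (rule_port_ranges : List String) (packet_port : Option Int) (out : Bool) : Decidable (Spec_port_matches_py rule_port_ranges packet_port out) := by unfold Spec_port_matches_py; infer_instance

-- ===== CLAIM =====
def Claim_equal_port_matches_py : Prop := ∀ (rule_port_ranges : List String) (packet_port : Option Int), Dom_port_matches_py rule_port_ranges packet_port → Spec_port_matches_py rule_port_ranges packet_port (port_matches_py rule_port_ranges packet_port)

-- ===== LEMMAS AND PROOFS =====
theorem portMatchesLoop_cons (p : Int) (r : String) (rest : List String) :
    portMatchesLoop p (r :: rest) =
      ((match parseRange? r with
        | some iv => decide (iv.1 ≤ p) && decide (p ≤ iv.2)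
        | none => false) || portMatchesLoop p rest) := by
  conv_lhs => rw [portMatchesLoop]
  unfold parseRange?
  split
  · cases hsp : PySem.Str.splitMax? r "-" 1 with
    | none => simp
    | some parts =>
      match parts with
      | [] => simp
      | [a] => simp
      | a :: b :: t =>
        cases h0 : PySem.Int.ofStr? a with
        | none => cases h1 : PySem.Int.ofStr? b <;> simp [h0, h1]
        | some lo =>
          cases h1 : PySem.Int.ofStr? b with
          | none => simp [h0, h1]
          | some hi =>
            simp only [h0, h1]
            by_cases hl : lo ≤ p <;> by_cases hh : p ≤ hi <;> simp [hl, hh]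
  · cases h0 : PySem.Int.ofStr? r with
    | none => simp
    | some v =>
      simp only [Option.map_some]
      by_cases hp : p = v
      · simp [hp]
      · have h1 : ¬ (v ≤ p) ∨ ¬ (p ≤ v) := by omega
        rcases h1 with h1 | h1 <;> simp [hp, h1]

-- A's loop is existence of a containing interval among the parsed entries
theorem portMatchesLoop_eq (p : Int) (rs : List String) :
    portMatchesLoop p rs =
      (rs.filterMap parseRange?).any (fun iv => decide (iv.1 ≤ p) && decide (p ≤ iv.2)) := by
  induction rs with
  | nil => rfl
  | cons r rest ih =>
    rw [portMatchesLoop_cons, List.filterMap_cons, ih]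
    cases parseRange? r <;> simp

-- the merge fold preserves "some interval contains p", given the lows are sorted
-- and the head of the accumulator has a low ≤ every incoming low
theorem mergeFold_any (p : Int) (xs : List (Int × Int)) :
    ∀ acc : List (Int × Int),
      xs.Pairwise (fun a b => a.1 ≤ b.1) →
      (∀ h, acc.head? = some h → ∀ iv ∈ xs, h.1 ≤ iv.1) →
      (xs.foldl mergeStep acc).any (fun iv => decide (iv.1 ≤ p) && decide (p ≤ iv.2)) =
        (acc.any (fun iv => decide (iv.1 ≤ p) && decide (p ≤ iv.2))
          || xs.any (fun iv => decide (iv.1 ≤ p) && decide (p ≤ iv.2))) := by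
  induction xs with
  | nil => intro acc _ _; simp
  | cons iv rest ih =>
    intro acc hpw hhead
    have hpw' : rest.Pairwise (fun a b => a.1 ≤ b.1) := (List.pairwise_cons.mp hpw).2
    have hivrest : ∀ j ∈ rest, iv.1 ≤ j.1 := (List.pairwise_cons.mp hpw).1
    simp only [List.foldl_cons]
    match hacc : acc with
    | [] =>
      rw [show mergeStep [] iv = [iv] from rfl, ih [iv] hpw' (by
        intro h hh j hj
        simp at hh
        subst hh
        exact hivrest j hj)]
      simp
    | (plo, phi) :: t =>
      have hplo : plo ≤ iv.1 := hhead (plo, phi) rfl iv (by simp)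
      by_cases hm : iv.1 ≤ phi
      · have hstep : mergeStep ((plo, phi) :: t) iv = (plo, max phi iv.2) :: t := by
          simp [mergeStep, hm]
        rw [hstep, ih _ hpw' (by
          intro h hh j hj
          simp at hh
          subst hh
          exact le_trans hplo (hivrest j hj))]
        have hkey : (decide (plo ≤ p) && decide (p ≤ max phi iv.2)) =
            ((decide (plo ≤ p) && decide (p ≤ phi)) || (decide (iv.1 ≤ p) && decide (p ≤ iv.2))) := by
          rcases iv with ⟨lo, hi⟩
          simp only at hm hplo ⊢
          apply Bool.eq_iff_iff.mpr
          simp only [Bool.or_eq_true, Bool.and_eq_true, decide_eq_true_iff, le_max_iff]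
          omega
        simp only [List.any_cons, hkey]
        cases t.any (fun iv => decide (iv.1 ≤ p) && decide (p ≤ iv.2)) <;>
          cases rest.any (fun iv => decide (iv.1 ≤ p) && decide (p ≤ iv.2)) <;> simp
      · have hstep : mergeStep ((plo, phi) :: t) iv = iv :: (plo, phi) :: t := by
          simp [mergeStep, hm]
        rw [hstep, ih _ hpw' (by
          intro h hh j hj
          simp at hh
          subst hh
          exact hivrest j hj)]
        simp only [List.any_cons]
        cases decide (iv.1 ≤ p) && decide (p ≤ iv.2) <;> simp

-- any over a permutation (via existence of a member)
theorem any_perm {α : Type} {xs ys : List α} (h : xs.Perm ys) (f : α → Bool) :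
    xs.any f = ys.any f := by
  cases hx : xs.any f <;> cases hy : ys.any f <;> try rfl
  · rw [List.any_eq_false] at hx
    rw [List.any_eq_true] at hy
    rcases hy with ⟨a, ha, hf⟩
    exact absurd hf (by simp [hx a (h.mem_iff.mpr ha)])
  · rw [List.any_eq_false] at hy
    rw [List.any_eq_true] at hx
    rcases hx with ⟨a, ha, hf⟩
    exact absurd hf (by simp [hy a (h.mem_iff.mp ha)])

-- ===== VERDICT =====
theorem port_matches_py_spec : Claim_equal_port_matches_py := by
  intro rs pp _
  unfold Spec_port_matches_py port_matches_py port_matches_py_alt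
  cases rs with
  | nil => rfl
  | cons r rest =>
    cases pp with
    | none => rfl
    | some p =>
      rw [show (r :: rest).isEmpty = false from rfl]
      simp only [Bool.false_eq_true, if_false]
      rw [portMatchesLoop_eq]
      set ivs := (r :: rest).filterMap parseRange? with hivs
      set sivs := PySem.List.sorted ivs (fun iv => iv.1) false with hs
      rw [List.any_reverse]
      rw [mergeFold_any p sivs [] (PySem.List.sorted_pairwise ivs (fun iv => iv.1))
        (by intro h hh; simp at hh)]
      simp only [List.any_nil, Bool.false_or]
      exact any_perm (PySem.List.sorted_perm ivs (fun iv => iv.1) false).symm _
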